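-- pv_equiv track=rewrite | github.com/Shouryanpatil/Spliced-Motif-Finder | spliced_motif_solver.py | find_all_spliced_motif_indices
-- ===== SOURCE A (Python) =====
-- def find_all_spliced_motif_indices(s, t):
--     all_paths = []
--
--     def backtrack(path, s_index, t_index):
--         if t_index == len(t):
--             all_paths.append(path[:])  # Found full match
--             return
--         current_char = t[t_index]
--         for i in range(s_index, len(s)):
--             if s[i] == current_char:
--                 path.append(i + 1)  # 1-based indexing
--                 backtrack(path, i + 1, t_index + 1)
--                 path.pop()  # Backtrack
--
--     backtrack([], 0, 0)
--     return all_paths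
-- ===== SOURCE B (Python) =====
-- def find_all_spliced_motif_indices(s, t):
--     # Bottom-up DP over suffixes: row[ti] = all embeddings of t[ti:] in s using
--     # 1-based indices > si, built iterating si from the end; no recursion, no rescans.
--     n, m = len(s), len(t)
--     row = [[] for _ in range(m)] + [[[]]]
--     for si in range(n - 1, -1, -1):
--         new_row = [[] for _ in range(m)] + [[[]]]
--         for ti in range(m):
--             if s[si] == t[ti]:
--                 new_row[ti] = [[si + 1] + e for e in row[ti + 1]] + row[ti]
--             else:
--                 new_row[ti] = row[ti]
--         row = new_row
--     return row[0]
-- ===== Notes on version B (the rewrite author's own statement) =====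
-- stated objective: alternative
-- what changed: Replaced the recursive backtracking that rescans s from s_index at every node (and fully explores dead branches) by an iterative bottom-up DP over suffixes of s, keeping one row of embedding lists per suffix of t; dead branches cost O(1) per cell.
import Mathlib
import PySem

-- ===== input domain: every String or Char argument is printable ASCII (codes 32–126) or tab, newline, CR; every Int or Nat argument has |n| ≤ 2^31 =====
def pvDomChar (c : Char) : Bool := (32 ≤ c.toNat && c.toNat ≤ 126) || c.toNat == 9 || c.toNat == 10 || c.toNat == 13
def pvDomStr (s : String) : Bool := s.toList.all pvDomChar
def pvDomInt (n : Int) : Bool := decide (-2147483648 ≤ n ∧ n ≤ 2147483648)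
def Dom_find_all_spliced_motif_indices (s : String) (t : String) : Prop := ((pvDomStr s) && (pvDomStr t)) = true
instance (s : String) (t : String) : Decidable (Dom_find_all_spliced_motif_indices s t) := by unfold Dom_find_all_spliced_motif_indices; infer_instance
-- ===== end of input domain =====

-- B replaces A's recursive backtracking (which rescans s from s_index at each node) by an
-- iterative bottom-up DP over suffixes; alternative decomposition, same exact output.

-- ===== PORT A =====
-- A's backtrack(path, s_index, t_index): the t_index counter is ported as the suffix of t
-- (t_index == len(t)  ↔  suffix = []); the for-loop over range(s_index, len(s)) is a foldl
-- accumulating all_paths; path.append/pop become passing path ++ [i+1] to the recursive call.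
def pvBackA (sl : List Char) (path : List Int) (si : Nat) : List Char → List (List Int)
  | [] => [path]
  | c :: rest =>
      (List.range' si (sl.length - si)).foldl
        (fun acc i =>
          if sl.getD i ' ' = c then
            acc ++ pvBackA sl (path ++ [((i : Int) + 1)]) (i + 1) rest
          else acc) []

def find_all_spliced_motif_indices (s : String) (t : String) : List (List Int) :=
  pvBackA s.toList [] 0 t.toList

-- ===== PORT B =====
-- one step of the DP: new_row[ti] for ti < m, plus the constant last cell [[ ]]
def pvStepB (sl tl : List Char) (row : List (List (List Int))) (si : Nat) :
    List (List (List Int)) :=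
  (List.range tl.length).map (fun ti =>
    if sl.getD si ' ' = tl.getD ti ' ' then
      ((row.getD (ti + 1) []).map (fun e => ((si : Int) + 1) :: e)) ++ row.getD ti []
    else row.getD ti []) ++ [[[]]]

def find_all_spliced_motif_indices_alt (s : String) (t : String) : List (List Int) :=
  -- row0 = [[] for _ in range(m)] + [[[]]]; fold over range(n-1,-1,-1) = (range n).reverse
  ((((List.range s.toList.length).reverse).foldl (pvStepB s.toList t.toList)
      ((List.range t.toList.length).map (fun _ => []) ++ [[[]]]))).getD 0 []

-- ===== PRECONDITION & SPEC =====
def Spec_find_all_spliced_motif_indices (s : String) (t : String) (out : List (List Int)) : Prop := out = find_all_spliced_motif_indices_alt s t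
instance (s : String) (t : String) (out : List (List Int)) : Decidable (Spec_find_all_spliced_motif_indices s t out) := by unfold Spec_find_all_spliced_motif_indices; infer_instance

-- ===== CLAIM (what is proved, stated in full; the proofs are below) =====
def Claim_equal_find_all_spliced_motif_indices : Prop := ∀ (s : String) (t : String), Dom_find_all_spliced_motif_indices s t → Spec_find_all_spliced_motif_indices s t (find_all_spliced_motif_indices s t)

-- ===== LEMMAS AND PROOFS =====

-- The common recurrence pvF: all embeddings (as 1-based index lists) of the suffix `ts` of t
-- into s at positions ≥ si, in A's (lexicographic) enumeration order.
def pvF (sl : List Char) (si : Nat) : List Char → List (List Int)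
  | [] => [[]]
  | c :: ts =>
      if si < sl.length then
        (if sl.getD si ' ' = c then (pvF sl (si + 1) ts).map (((si : Int) + 1) :: ·) else [])
          ++ pvF sl (si + 1) (c :: ts)
      else []
  termination_by ts => (ts.length, sl.length - si)
  decreasing_by
    · exact Prod.Lex.left _ _ (by simp)
    · exact Prod.Lex.right _ (by omega)

lemma pvBackA_flat (sl : List Char) (path : List Int) (si : Nat) (c : Char) (rest : List Char) :
    pvBackA sl path si (c :: rest) =
      (List.range' si (sl.length - si)).flatMap
        (fun i => if sl.getD i ' ' = c then pvBackA sl (path ++ [((i : Int) + 1)]) (i + 1) rest else []) := by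
  have hfun : (fun (acc : List (List Int)) i =>
      if sl.getD i ' ' = c then acc ++ pvBackA sl (path ++ [((i : Int) + 1)]) (i + 1) rest else acc)
      = fun acc i => acc ++ (if sl.getD i ' ' = c then pvBackA sl (path ++ [((i : Int) + 1)]) (i + 1) rest else []) := by
    funext acc i; split <;> simp
  rw [pvBackA, hfun, PySem.List.foldl_append_eq_flatMap]
  simp

lemma pvBackA_eq (sl : List Char) : ∀ ts si path,
    pvBackA sl path si ts = (pvF sl si ts).map (path ++ ·) := by
  intro ts
  induction ts with
  | nil => intro si path; simp [pvBackA, pvF]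
  | cons c rest ih =>
    have inner : ∀ k si, sl.length - si ≤ k → ∀ path,
        pvBackA sl path si (c :: rest) = (pvF sl si (c :: rest)).map (path ++ ·) := by
      intro k
      induction k with
      | zero =>
        intro si h path
        have hge : sl.length ≤ si := by omega
        rw [pvBackA_flat, pvF]
        simp [Nat.sub_eq_zero_of_le hge, Nat.not_lt.mpr hge]
      | succ k ihk =>
        intro si h path
        by_cases hlt : si < sl.length
        · have hr : sl.length - si = (sl.length - (si + 1)) + 1 := by omega
          rw [pvBackA_flat, hr, List.range'_succ, List.flatMap_cons, ← pvBackA_flat]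
          rw [ih (si + 1) (path ++ [((si : Int) + 1)]), ihk (si + 1) (by omega) path]
          conv_rhs => rw [pvF]
          rw [if_pos hlt, List.map_append]
          congr 1
          split
          · rw [List.map_map]; apply List.map_congr_left; intro e _; simp
          · simp
        · have hge : sl.length ≤ si := by omega
          rw [pvBackA_flat, pvF]
          simp [Nat.sub_eq_zero_of_le hge, Nat.not_lt.mpr hge]
    intro si path
    exact inner (sl.length - si) si le_rfl path

-- the DP row at cut si: entry ti is pvF sl si (tl.drop ti)
def pvRow (sl tl : List Char) (si : Nat) : List (List (List Int)) :=
  (List.range tl.length).map (fun ti => pvF sl si (tl.drop ti)) ++ [[[]]]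

lemma getD_pvRow (sl tl : List Char) (si ti : Nat) (h : ti ≤ tl.length) :
    (pvRow sl tl si).getD ti [] = pvF sl si (tl.drop ti) := by
  rcases Nat.lt_or_ge ti tl.length with h1 | h1
  · simp [pvRow, List.getD, List.getElem?_append, h1]
  · have hti : ti = tl.length := le_antisymm h h1
    subst hti
    simp [pvRow, List.getD, pvF, List.drop_length]

lemma pvStepB_row (sl tl : List Char) (si : Nat) (hlt : si < sl.length) :
    pvStepB sl tl (pvRow sl tl (si + 1)) si = pvRow sl tl si := by
  rw [pvStepB]
  conv_rhs => rw [pvRow]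
  congr 1
  apply List.map_congr_left
  intro ti hti
  have hti' : ti < tl.length := List.mem_range.mp hti
  rw [getD_pvRow sl tl (si + 1) (ti + 1) (by omega),
      getD_pvRow sl tl (si + 1) ti (by omega)]
  have hdrop : tl.drop ti = tl[ti] :: tl.drop (ti + 1) := (List.getElem_cons_drop hti').symm
  have hgetD : tl.getD ti ' ' = tl[ti] := by
    simp [List.getD, List.getElem?_eq_getElem hti']
  conv_rhs => rw [hdrop, pvF]
  simp only [hlt, if_pos, hgetD]
  split <;> simp

lemma pvFold_row (sl tl : List Char) : ∀ k, k ≤ sl.length →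
    List.foldl (pvStepB sl tl) (pvRow sl tl k) ((List.range k).reverse) = pvRow sl tl 0 := by
  intro k
  induction k with
  | zero => intro _; simp
  | succ k ihk =>
    intro h
    rw [List.range_succ]
    simp only [List.reverse_append, List.reverse_singleton, List.singleton_append, List.foldl_cons]
    rw [pvStepB_row sl tl k (by omega)]
    exact ihk (by omega)

lemma pvRow0_eq (sl tl : List Char) :
    (List.range tl.length).map (fun _ => ([] : List (List Int))) ++ [[[]]] = pvRow sl tl sl.length := by
  unfold pvRow
  congr 1
  apply List.map_congr_left
  intro ti hti
  have hti' : ti < tl.length := List.mem_range.mp hti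
  have hne : tl.drop ti ≠ [] := by
    simp only [ne_eq, List.drop_eq_nil_iff]; omega
  obtain ⟨c, ts, hcts⟩ := List.exists_cons_of_ne_nil hne
  rw [hcts, pvF]
  simp

-- ===== VERDICT (by name: the statement is the Claim_ definition above) =====
theorem find_all_spliced_motif_indices_spec : Claim_equal_find_all_spliced_motif_indices := by
  intro s t _
  show find_all_spliced_motif_indices s t = find_all_spliced_motif_indices_alt s t
  unfold find_all_spliced_motif_indices find_all_spliced_motif_indices_alt
  rw [pvBackA_eq s.toList t.toList 0 []]
  rw [pvRow0_eq s.toList t.toList, pvFold_row s.toList t.toList s.toList.length le_rfl,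
      getD_pvRow s.toList t.toList 0 0 (Nat.zero_le _)]
  simp
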